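-- pv_equiv track=rewrite | github.com/wangzhijiang-nreal/chromium-prebuild-scripts | tasks/process_resource.py | _NewCollectionName
-- ===== SOURCE A (Python) =====
-- def _NewCollectionName(srcdir):
--   begin = False
--   name = ''
--   for c in srcdir:
--     if not begin:
--       if c.isalnum() or c == '_' or c == '-':
--         begin = True
--
--     if begin:
--       if c == '/':
--         name += '_'
--       else:
--         name += c
--   return name
-- ===== SOURCE B (Python) =====
-- def _NewCollectionName(srcdir):
--   for i, c in enumerate(srcdir):
--     if c.isalnum() or c == '_' or c == '-':
--       return srcdir[i:].replace('/', '_')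
--   return ''
-- ===== Notes on version B (the rewrite author's own statement) =====
-- stated objective: simpler
-- what changed: B replaces A's single fold threading a (begin, name) state through every character by a locate pass (first alnum/_/- character) followed by one slice and one library str.replace on the tail.
import Mathlib
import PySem

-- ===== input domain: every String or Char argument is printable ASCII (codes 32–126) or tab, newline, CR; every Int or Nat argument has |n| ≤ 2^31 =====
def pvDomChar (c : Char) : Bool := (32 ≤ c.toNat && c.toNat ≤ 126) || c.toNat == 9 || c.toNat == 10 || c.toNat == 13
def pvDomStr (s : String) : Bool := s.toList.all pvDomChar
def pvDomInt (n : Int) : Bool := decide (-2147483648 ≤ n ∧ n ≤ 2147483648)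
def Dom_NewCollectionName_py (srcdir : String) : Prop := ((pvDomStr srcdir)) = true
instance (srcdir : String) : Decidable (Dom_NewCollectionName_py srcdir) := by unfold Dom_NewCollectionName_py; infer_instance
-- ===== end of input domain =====

-- B locates the start with one scan and then does a single slice+replace,
-- instead of A's interleaved skip-then-accumulate fold (objective: simpler).

-- ===== PORT A =====
-- A's for-loop: state (begin, name) threaded through a left fold over the characters.
def NewCollectionName_py (srcdir : String) : String :=
  let r := srcdir.toList.foldl
    (fun (st : Bool × List Char) c =>
      let b := if !st.1 then (PySem.Chars.isalnum c || c == '_' || c == '-') else st.1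
      if b then (b, st.2 ++ (if c == '/' then ['_'] else [c])) else (b, st.2))
    (false, [])
  String.ofList r.2

-- ===== PORT B =====
-- first character counting as a name start (c.isalnum() or c == '_' or c == '-')
def pvGood (c : Char) : Bool := PySem.Chars.isalnum c || c == '_' || c == '-'

-- B's enumerate loop: index of the first good character, or none
def pvFindStart : List Char → Nat → Option Nat
  | [], _ => none
  | c :: rest, i => if pvGood c then some i else pvFindStart rest (i + 1)

def NewCollectionName_py_alt (srcdir : String) : String :=
  match pvFindStart srcdir.toList 0 with
  | some i =>
      String.ofList (PySem.Chars.replace (PySem.List.slice srcdir.toList (some (i : Int)) none) ['/'] ['_'])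
  | none => ""

-- ===== PRECONDITION & SPEC =====
def Spec_NewCollectionName_py (srcdir : String) (out : String) : Prop := out = NewCollectionName_py_alt srcdir
instance (srcdir : String) (out : String) : Decidable (Spec_NewCollectionName_py srcdir out) := by unfold Spec_NewCollectionName_py; infer_instance

-- ===== CLAIM (what is proved, stated in full; the proofs are below) =====
def Claim_equal_NewCollectionName_py : Prop := ∀ (srcdir : String), Dom_NewCollectionName_py srcdir → Spec_NewCollectionName_py srcdir (NewCollectionName_py srcdir)

-- ===== LEMMAS AND PROOFS =====

-- A's loop body, named for the proofs (definitionally the lambda in the port)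
def pvStep (st : Bool × List Char) (c : Char) : Bool × List Char :=
  let b := if !st.1 then (PySem.Chars.isalnum c || c == '_' || c == '-') else st.1
  if b then (b, st.2 ++ (if c == '/' then ['_'] else [c])) else (b, st.2)

theorem pvA_eq (srcdir : String) :
    NewCollectionName_py srcdir = String.ofList (srcdir.toList.foldl pvStep (false, [])).2 := rfl

-- single-character replace is a map
theorem pv_go_spec (fuel : Nat) : ∀ (l acc : List Char), l.length ≤ fuel →
    PySem.Chars.replace.go ['/'] ['_'] fuel l acc
      = acc.reverse ++ l.map (fun c => if c == '/' then '_' else c) := by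
  induction fuel with
  | zero =>
    intro l acc h
    have hl : l = [] := List.eq_nil_of_length_eq_zero (Nat.le_zero.mp h)
    subst hl
    simp [PySem.Chars.replace.go]
  | succ n ih =>
    intro l acc h
    cases l with
    | nil => simp [PySem.Chars.replace.go]
    | cons c t =>
      have ht : t.length ≤ n := by simpa using Nat.le_of_succ_le_succ h
      by_cases hc : c = '/'
      · subst hc
        rw [PySem.Chars.replace.go]
        simp only [List.isPrefixOf, beq_self_eq_true, Bool.and_self, if_true, List.length_cons,
          List.length_nil, List.drop_succ_cons, List.drop_zero, List.reverse_singleton,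
          List.singleton_append]
        rw [ih t ('_' :: acc) ht]
        simp
      · have hne : (('/' : Char) == c) = false :=
          beq_eq_false_iff_ne.mpr (fun h => hc h.symm)
        rw [PySem.Chars.replace.go]
        simp only [List.isPrefixOf, hne, Bool.false_and, Bool.false_eq_true, if_false]
        rw [ih t (c :: acc) ht]
        simp [hc]

theorem pv_replace_map (cs : List Char) :
    PySem.Chars.replace cs ['/'] ['_'] = cs.map (fun c => if c == '/' then '_' else c) := by
  unfold PySem.Chars.replace
  simpa using pv_go_spec cs.length cs [] (le_refl _)

-- A's fold after begin has become true: it just appends the replaced characters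
theorem pvA_true : ∀ (l : List Char) (acc : List Char),
    l.foldl pvStep (true, acc)
      = (true, acc ++ l.map (fun c => if c == '/' then '_' else c)) := by
  intro l
  induction l with
  | nil => simp
  | cons c t ih =>
    intro acc
    have hstep : pvStep (true, acc) c = (true, acc ++ [if c == '/' then '_' else c]) := by
      by_cases hc : c = '/' <;> simp [pvStep, hc]
    rw [List.foldl_cons, hstep, ih]
    simp

-- A's fold from (false, []) computes the map of the dropWhile
theorem pvA_false : ∀ (l : List Char),
    (l.foldl pvStep (false, [])).2
      = (l.dropWhile (fun c => !pvGood c)).map (fun c => if c == '/' then '_' else c) := by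
  intro l
  induction l with
  | nil => simp
  | cons c t ih =>
    by_cases hg : pvGood c = true
    · have hb : (PySem.Chars.isalnum c || c == '_' || c == '-') = true := hg
      have hstep : pvStep (false, []) c = (true, [] ++ (if c == '/' then ['_'] else [c])) := by
        simp [pvStep, hb]
      rw [List.foldl_cons, hstep, pvA_true]
      simp only [List.dropWhile_cons, hg, Bool.not_true]
      by_cases hc : c = '/' <;> simp [hc]
    · have hb : (PySem.Chars.isalnum c || c == '_' || c == '-') = false := by
        simpa [pvGood] using hg
      have hstep : pvStep (false, []) c = (false, []) := by simp [pvStep, hb]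
      rw [List.foldl_cons, hstep]
      simp only [List.dropWhile_cons, hg, Bool.not_false]
      simpa using ih

-- B's locate-then-slice computes the same map of the dropWhile
theorem pvB_gen : ∀ (l : List Char) (k : Nat) (full : List Char), full.drop k = l →
    (match pvFindStart l k with
     | some i => (full.drop i).map (fun c => if c == '/' then '_' else c)
     | none => ([] : List Char))
      = (l.dropWhile (fun c => !pvGood c)).map (fun c => if c == '/' then '_' else c) := by
  intro l
  induction l with
  | nil => intro k full h; simp [pvFindStart]
  | cons c t ih =>
    intro k full h
    by_cases hg : pvGood c = true
    · simp only [pvFindStart, hg, if_true, List.dropWhile_cons, Bool.not_true, h]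
      simp
    · have hdrop : full.drop (k + 1) = t := by
        rw [← List.drop_drop, h]; rfl
      simp only [pvFindStart, hg, List.dropWhile_cons, Bool.not_false]
      simpa [hg] using ih (k + 1) full hdrop

-- ===== VERDICT (by name: the statement is the Claim_ definition above) =====
theorem NewCollectionName_py_spec : Claim_equal_NewCollectionName_py := by
  intro srcdir _
  show NewCollectionName_py srcdir = NewCollectionName_py_alt srcdir
  rw [pvA_eq, pvA_false]
  unfold NewCollectionName_py_alt
  have hB := pvB_gen srcdir.toList 0 srcdir.toList (by simp)
  cases hfs : pvFindStart srcdir.toList 0 with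
  | none =>
    rw [hfs] at hB
    simp only at hB
    simp only
    rw [← hB]
  | some i =>
    rw [hfs] at hB
    simp only at hB
    simp only
    rw [← hB, pv_replace_map, PySem.List.slice_from_natCast]
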